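-- pv_equiv track=rewrite | github.com/LaurentPRAT-DB/job_monitor | job_monitor/backend/routers/alerts.py | _generate_failure_remediation
-- ===== SOURCE A (Python) =====
-- def _generate_failure_remediation(failure_reasons: list[str]) -> str:
--     """Generate context-aware remediation for failure alerts."""
--     if not failure_reasons:
--         return "Review recent run logs for error details. Check for resource constraints or data quality issues."
--
--     reasons_lower = [r.lower() for r in failure_reasons]
--
--     # Check for OOM patterns
--     if any("memory" in r or "oom" in r or "heap" in r for r in reasons_lower):
--         return "Memory issue detected. Consider increasing cluster size, enabling autoscaling, or optimizing data processing (partitioning, caching)."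
--
--     # Check for timeout patterns
--     if any("timeout" in r or "timed out" in r for r in reasons_lower):
--         return "Timeout detected. Review job duration trends, consider increasing timeout limits, or optimize slow operations."
--
--     # Check for data quality patterns
--     if any("null" in r or "schema" in r or "type" in r for r in reasons_lower):
--         return "Data quality issue detected. Validate input data schemas, add null handling, and implement data quality checks."
--
--     # Check for permission/auth issues
--     if any("permission" in r or "access" in r or "denied" in r for r in reasons_lower):
--         return "Permission issue detected. Review service principal permissions and IAM roles."
--
--     # Generic remediation with failure context
--     return f"Recent failures: {', '.join(failure_reasons[:3])}. Review run logs and check for infrastructure or data issues."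
-- ===== SOURCE B (Python) =====
-- _REMEDIATION_TABLE = [
--     (("memory", "oom", "heap"),
--      "Memory issue detected. Consider increasing cluster size, enabling autoscaling, or optimizing data processing (partitioning, caching)."),
--     (("timeout", "timed out"),
--      "Timeout detected. Review job duration trends, consider increasing timeout limits, or optimize slow operations."),
--     (("null", "schema", "type"),
--      "Data quality issue detected. Validate input data schemas, add null handling, and implement data quality checks."),
--     (("permission", "access", "denied"),
--      "Permission issue detected. Review service principal permissions and IAM roles."),
-- ]
--
--
-- def _category(reason_lower):
--     """Index of the highest-priority category this single reason matches."""
--     for i, (keywords, _) in enumerate(_REMEDIATION_TABLE):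
--         if any(k in reason_lower for k in keywords):
--             return i
--     return len(_REMEDIATION_TABLE)
--
--
-- def _generate_failure_remediation(failure_reasons):
--     """Generate context-aware remediation for failure alerts."""
--     if not failure_reasons:
--         return "Review recent run logs for error details. Check for resource constraints or data quality issues."
--     best = min(_category(r.lower()) for r in failure_reasons)
--     if best < len(_REMEDIATION_TABLE):
--         return _REMEDIATION_TABLE[best][1]
--     return f"Recent failures: {', '.join(failure_reasons[:3])}. Review run logs and check for infrastructure or data issues."
-- ===== Notes on version B (the rewrite author's own statement) =====
-- stated objective: alternative
-- what changed: Replaces the four hard-coded per-category any-scans with an ordered (keywords, message) priority table and a single pass computing each reason's first-matching category index, returning the table message of the minimum index (or the generic fallback).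
import Mathlib
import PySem

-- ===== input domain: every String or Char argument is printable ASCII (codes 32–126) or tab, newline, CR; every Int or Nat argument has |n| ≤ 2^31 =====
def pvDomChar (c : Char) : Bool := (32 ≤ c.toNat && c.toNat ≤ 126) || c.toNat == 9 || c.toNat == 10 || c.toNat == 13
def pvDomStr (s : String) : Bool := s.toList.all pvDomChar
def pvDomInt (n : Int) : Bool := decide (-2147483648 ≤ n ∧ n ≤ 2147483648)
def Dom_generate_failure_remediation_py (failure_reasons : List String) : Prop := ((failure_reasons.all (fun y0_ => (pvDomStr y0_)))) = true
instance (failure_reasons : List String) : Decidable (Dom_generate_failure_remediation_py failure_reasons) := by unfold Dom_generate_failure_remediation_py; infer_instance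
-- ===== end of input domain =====

-- B replaces A's four per-category any-scans by a priority table and one pass computing the
-- minimum matching category per reason (objective: alternative; same behaviour, same cost).


-- ===== PORT A =====
def generate_failure_remediation_py (failure_reasons : List String) : String :=
  if failure_reasons = [] then
    "Review recent run logs for error details. Check for resource constraints or data quality issues."
  else
    let reasons_lower := failure_reasons.map (fun r => PySem.Str.lower r)
    if reasons_lower.any (fun r => PySem.Str.isIn "memory" r || PySem.Str.isIn "oom" r || PySem.Str.isIn "heap" r) then
      "Memory issue detected. Consider increasing cluster size, enabling autoscaling, or optimizing data processing (partitioning, caching)."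
    else if reasons_lower.any (fun r => PySem.Str.isIn "timeout" r || PySem.Str.isIn "timed out" r) then
      "Timeout detected. Review job duration trends, consider increasing timeout limits, or optimize slow operations."
    else if reasons_lower.any (fun r => PySem.Str.isIn "null" r || PySem.Str.isIn "schema" r || PySem.Str.isIn "type" r) then
      "Data quality issue detected. Validate input data schemas, add null handling, and implement data quality checks."
    else if reasons_lower.any (fun r => PySem.Str.isIn "permission" r || PySem.Str.isIn "access" r || PySem.Str.isIn "denied" r) then
      "Permission issue detected. Review service principal permissions and IAM roles."
    else
      "Recent failures: " ++ PySem.Str.join ", " (PySem.List.slice failure_reasons none (some 3)) ++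
        ". Review run logs and check for infrastructure or data issues."

-- ===== PORT B =====
def pvTable : List (List String × String) :=
  [ (["memory", "oom", "heap"],
     "Memory issue detected. Consider increasing cluster size, enabling autoscaling, or optimizing data processing (partitioning, caching)."),
    (["timeout", "timed out"],
     "Timeout detected. Review job duration trends, consider increasing timeout limits, or optimize slow operations."),
    (["null", "schema", "type"],
     "Data quality issue detected. Validate input data schemas, add null handling, and implement data quality checks."),
    (["permission", "access", "denied"],
     "Permission issue detected. Review service principal permissions and IAM roles.") ]

-- the for-loop of _category: first table index whose keywords match, else the table length
def pvCategoryAux (rl : String) : List (List String × String) → Nat → Nat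
  | [], i => i
  | (kws, _) :: rest, i => if kws.any (fun k => PySem.Str.isIn k rl) then i else pvCategoryAux rl rest (i + 1)

def pvCategory (rl : String) : Nat := pvCategoryAux rl pvTable 0

def generate_failure_remediation_py_alt (failure_reasons : List String) : String :=
  if failure_reasons = [] then
    "Review recent run logs for error details. Check for resource constraints or data quality issues."
  else
    let best := (PySem.List.min? (failure_reasons.map (fun r => pvCategory (PySem.Str.lower r))) (fun x => x)).getD pvTable.length
    if h : best < pvTable.length then
      (pvTable[best]).2
    else
      "Recent failures: " ++ PySem.Str.join ", " (PySem.List.slice failure_reasons none (some 3)) ++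
        ". Review run logs and check for infrastructure or data issues."

-- ===== PRECONDITION & SPEC =====
def Spec_generate_failure_remediation_py (failure_reasons : List String) (out : String) : Prop := out = generate_failure_remediation_py_alt failure_reasons
instance (failure_reasons : List String) (out : String) : Decidable (Spec_generate_failure_remediation_py failure_reasons out) := by unfold Spec_generate_failure_remediation_py; infer_instance

-- ===== CLAIM (what is proved, stated in full; the proofs are below) =====
def Claim_equal_generate_failure_remediation_py : Prop := ∀ (failure_reasons : List String), Dom_generate_failure_remediation_py failure_reasons → Spec_generate_failure_remediation_py failure_reasons (generate_failure_remediation_py failure_reasons)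

-- ===== LEMMAS AND PROOFS =====

-- the four per-reason category predicates, as A tests them
def pvP0 (r : String) : Bool := PySem.Str.isIn "memory" r || PySem.Str.isIn "oom" r || PySem.Str.isIn "heap" r
def pvP1 (r : String) : Bool := PySem.Str.isIn "timeout" r || PySem.Str.isIn "timed out" r
def pvP2 (r : String) : Bool := PySem.Str.isIn "null" r || PySem.Str.isIn "schema" r || PySem.Str.isIn "type" r
def pvP3 (r : String) : Bool := PySem.Str.isIn "permission" r || PySem.Str.isIn "access" r || PySem.Str.isIn "denied" r

def pvChain (a0 a1 a2 a3 : Bool) : Nat :=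
  if a0 then 0 else if a1 then 1 else if a2 then 2 else if a3 then 3 else 4

lemma pvCategory_eq_chain (r : String) :
    pvCategory r = pvChain (pvP0 r) (pvP1 r) (pvP2 r) (pvP3 r) := by
  simp [pvCategory, pvCategoryAux, pvTable, pvChain, pvP0, pvP1, pvP2, pvP3, Bool.or_assoc]

lemma pvChain_le (a0 a1 a2 a3 : Bool) : pvChain a0 a1 a2 a3 ≤ 4 := by
  cases a0 <;> cases a1 <;> cases a2 <;> cases a3 <;> decide

lemma pvChain_min (p0 p1 p2 p3 a0 a1 a2 a3 : Bool) :
    min (pvChain p0 p1 p2 p3) (pvChain a0 a1 a2 a3)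
      = pvChain (p0 || a0) (p1 || a1) (p2 || a2) (p3 || a3) := by
  cases p0 <;> cases p1 <;> cases p2 <;> cases p3 <;>
    cases a0 <;> cases a1 <;> cases a2 <;> cases a3 <;> rfl

lemma pvFold_chain (l : List String) (a : Nat) (ha : a ≤ 4) :
    List.foldl min a (l.map pvCategory)
      = min a (pvChain (l.any pvP0) (l.any pvP1) (l.any pvP2) (l.any pvP3)) := by
  induction l generalizing a with
  | nil => simp [pvChain]; omega
  | cons r t ih =>
    have hc := pvCategory_eq_chain r
    have hle : pvCategory r ≤ 4 := by rw [hc]; exact pvChain_le _ _ _ _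
    simp only [List.map_cons, List.foldl_cons, List.any_cons]
    rw [ih (min a (pvCategory r)) (by omega)]
    rw [min_assoc, hc, pvChain_min]

lemma pvSelect (a0 a1 a2 a3 : Bool) (fb : String) :
    (if h : pvChain a0 a1 a2 a3 < pvTable.length then (pvTable[pvChain a0 a1 a2 a3]).2 else fb)
      = if a0 then
          "Memory issue detected. Consider increasing cluster size, enabling autoscaling, or optimizing data processing (partitioning, caching)."
        else if a1 then
          "Timeout detected. Review job duration trends, consider increasing timeout limits, or optimize slow operations."
        else if a2 then
          "Data quality issue detected. Validate input data schemas, add null handling, and implement data quality checks."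
        else if a3 then
          "Permission issue detected. Review service principal permissions and IAM roles."
        else fb := by
  cases a0 <;> cases a1 <;> cases a2 <;> cases a3 <;> rfl

theorem generate_failure_remediation_py_spec_aux (failure_reasons : List String) :
    generate_failure_remediation_py failure_reasons
      = generate_failure_remediation_py_alt failure_reasons := by
  cases failure_reasons with
  | nil => rfl
  | cons r t =>
    unfold generate_failure_remediation_py generate_failure_remediation_py_alt
    simp only [reduceCtorEq, if_false]
    have hmap : (r :: t).map (fun x => pvCategory (PySem.Str.lower x))
        = ((r :: t).map (fun x => PySem.Str.lower x)).map pvCategory := by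
      simp
    rw [hmap]
    set l := (r :: t).map (fun x => PySem.Str.lower x) with hl
    have hlen : ∃ r' t', l = r' :: t' := ⟨PySem.Str.lower r, t.map (fun x => PySem.Str.lower x), by simp [hl]⟩
    obtain ⟨r', t', hcons⟩ := hlen
    rw [hcons]
    rw [show (r' :: t').map pvCategory = pvCategory r' :: t'.map pvCategory from rfl]
    rw [PySem.List.min?_id_cons]
    have hle : pvCategory r' ≤ 4 := by rw [pvCategory_eq_chain]; exact pvChain_le _ _ _ _
    rw [show (some (List.foldl min (pvCategory r') (t'.map pvCategory))).getD pvTable.length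
          = List.foldl min (pvCategory r') (t'.map pvCategory) from rfl]
    rw [pvFold_chain t' (pvCategory r') hle, pvCategory_eq_chain, pvChain_min]
    simp only [show (fun r => PySem.Str.isIn "memory" r || PySem.Str.isIn "oom" r || PySem.Str.isIn "heap" r) = pvP0 from rfl,
               show (fun r => PySem.Str.isIn "timeout" r || PySem.Str.isIn "timed out" r) = pvP1 from rfl,
               show (fun r => PySem.Str.isIn "null" r || PySem.Str.isIn "schema" r || PySem.Str.isIn "type" r) = pvP2 from rfl,
               show (fun r => PySem.Str.isIn "permission" r || PySem.Str.isIn "access" r || PySem.Str.isIn "denied" r) = pvP3 from rfl]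
    simp only [List.any_cons]
    rw [pvSelect]
    rfl

-- ===== VERDICT (by name: the statement is the Claim_ definition above) =====
theorem generate_failure_remediation_py_spec : Claim_equal_generate_failure_remediation_py := by
  intro fr _
  unfold Spec_generate_failure_remediation_py
  exact generate_failure_remediation_py_spec_aux fr
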